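-- pv_equiv track=rewrite | github.com/KoretyAutomate/DR_2_Podcast | dr2_podcast/pipeline_translation.py | _split_sot_imrad
-- ===== SOURCE A (Python) =====
-- _IMRAD_HEADERS = {
--     "## Abstract",
--     "## 1. Introduction",
--     "## 2. Methods",
--     "## 3. Results",
--     "## 4. Discussion",
--     "## 5. References",
-- }
--
-- def _split_sot_imrad(sot_content: str) -> list:
--     """Split SOT at top-level IMRaD boundaries only.
--     Returns [(header, body), ...]. First entry may have header="" (preamble).
--     Embedded ## headers (case reports, framing doc) stay inside their parent section.
--     """
--     sections = []
--     current_header = ""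
--     current_lines = []
--
--     for line in sot_content.splitlines(keepends=True):
--         stripped = line.rstrip()
--         if stripped in _IMRAD_HEADERS:
--             # Flush previous section
--             sections.append((current_header, "".join(current_lines)))
--             current_header = stripped
--             current_lines = []
--         else:
--             current_lines.append(line)
--
--     # Flush last section
--     sections.append((current_header, "".join(current_lines)))
--     return sections
-- ===== SOURCE B (Python) =====
-- _IMRAD_HEADERS = {
--     "## Abstract",
--     "## 1. Introduction",
--     "## 2. Methods",
--     "## 3. Results",
--     "## 4. Discussion",
--     "## 5. References",
-- }
--
-- def _split_sot_imrad(sot_content: str) -> list: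
--     """Recursive decomposition: find the next IMRaD boundary, slice, recurse."""
--     def rec(header, lines):
--         i = next((k for k, l in enumerate(lines) if l.rstrip() in _IMRAD_HEADERS), None)
--         if i is None:
--             return [(header, "".join(lines))]
--         return [(header, "".join(lines[:i]))] + rec(lines[i].rstrip(), lines[i + 1:])
--     return rec("", sot_content.splitlines(keepends=True))
-- ===== Notes on version B (the rewrite author's own statement) =====
-- stated objective: alternative
-- what changed: Replaces A's single accumulate-and-flush loop with a recursive decomposition that finds the next IMRaD boundary line, emits the slice before it as one section, and recurses on the rest.
import Mathlib
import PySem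

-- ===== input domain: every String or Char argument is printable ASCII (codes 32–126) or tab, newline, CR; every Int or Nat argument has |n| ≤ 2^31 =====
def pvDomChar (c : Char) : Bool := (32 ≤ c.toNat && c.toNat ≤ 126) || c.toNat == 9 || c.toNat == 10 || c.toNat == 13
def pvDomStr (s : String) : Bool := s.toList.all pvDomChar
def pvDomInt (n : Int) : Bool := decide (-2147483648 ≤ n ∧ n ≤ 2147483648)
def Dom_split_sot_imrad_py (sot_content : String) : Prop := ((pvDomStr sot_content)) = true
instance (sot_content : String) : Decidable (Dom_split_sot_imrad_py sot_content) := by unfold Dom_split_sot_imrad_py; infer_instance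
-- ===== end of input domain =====

-- B re-implements A by recursive next-boundary search and slicing instead of an
-- accumulate-and-flush loop; objective: alternative decomposition, same cost.

-- shared module constant _IMRAD_HEADERS (a set of 6 string literals)
def imradHeaders : List String :=
  ["## Abstract", "## 1. Introduction", "## 2. Methods",
   "## 3. Results", "## 4. Discussion", "## 5. References"]

-- splitlines(keepends=True), ported by hand: exact on the Dom alphabet
-- (printable ASCII + tab/LF/CR), where the only line terminators are \n, \r, \r\n.
def splitKeep (cur : List Char) : List Char → List (List Char)
  | [] => if cur.isEmpty then [] else [cur]
  | '\r' :: '\n' :: rest => (cur ++ ['\r', '\n']) :: splitKeep [] rest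
  | '\r' :: rest => (cur ++ ['\r']) :: splitKeep [] rest
  | '\n' :: rest => (cur ++ ['\n']) :: splitKeep [] rest
  | c :: rest => splitKeep (cur ++ [c]) rest

def pyLines (s : String) : List String := (splitKeep [] s.toList).map String.ofList

-- ''.join(parts): plain concatenation, ported by hand (exact: '' separator)
def pyJoin : List String → String
  | [] => ""
  | s :: r => s ++ pyJoin r

-- ===== PORT A =====
def split_sot_imrad_py (sot_content : String) : List (String × String) :=
  let st := (pyLines sot_content).foldl
    (fun (st : List (String × String) × String × List String) line =>
      let (sections, currentHeader, currentLines) := st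
      let stripped := PySem.Str.rstrip line
      if imradHeaders.contains stripped then
        (sections ++ [(currentHeader, pyJoin currentLines)], stripped, [])
      else
        (sections, currentHeader, currentLines ++ [line]))
    ([], "", [])
  st.1 ++ [(st.2.1, pyJoin st.2.2)]

-- ===== PORT B =====
-- rec: body = lines up to the first boundary (enumerate/next = span), recurse past it
def altRec (header : String) (lines : List String) : List (String × String) :=
  match h : lines.span (fun l => !(imradHeaders.contains (PySem.Str.rstrip l))) with
  | (body, []) => [(header, pyJoin body)]
  | (body, hd :: tl) => (header, pyJoin body) :: altRec (PySem.Str.rstrip hd) tl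
termination_by lines.length
decreasing_by
  simp only [List.span_eq_takeWhile_dropWhile, Prod.mk.injEq] at h
  have hlen := List.length_dropWhile_le (p := fun l => !(imradHeaders.contains (PySem.Str.rstrip l))) (l := lines)
  rw [h.2] at hlen
  simp at hlen
  omega

def split_sot_imrad_py_alt (sot_content : String) : List (String × String) :=
  altRec "" (pyLines sot_content)

-- ===== PRECONDITION & SPEC =====
def Spec_split_sot_imrad_py (sot_content : String) (out : List (String × String)) : Prop := out = split_sot_imrad_py_alt sot_content
instance (sot_content : String) (out : List (String × String)) : Decidable (Spec_split_sot_imrad_py sot_content out) := by unfold Spec_split_sot_imrad_py; infer_instance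

-- ===== CLAIM (what is proved, stated in full; the proofs are below) =====
def Claim_equal_split_sot_imrad_py : Prop := ∀ (sot_content : String), Dom_split_sot_imrad_py sot_content → Spec_split_sot_imrad_py sot_content (split_sot_imrad_py sot_content)

-- ===== LEMMAS AND PROOFS =====

def prependBody (p : String) : List (String × String) → List (String × String)
  | [] => []
  | (h, b) :: r => (h, p ++ b) :: r

theorem prependBody_empty (x : List (String × String)) : prependBody "" x = x := by
  cases x with
  | nil => rfl
  | cons hd tl => cases hd; simp [prependBody]

theorem prependBody_prependBody (p q : String) (x : List (String × String)) :
    prependBody p (prependBody q x) = prependBody (p ++ q) x := by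
  cases x with
  | nil => rfl
  | cons hd tl => cases hd; simp [prependBody, String.append_assoc]

theorem join_append (a b : List String) :
    pyJoin (a ++ b) = pyJoin a ++ pyJoin b := by
  induction a with
  | nil => simp [pyJoin]
  | cons hd tl ih => simp [pyJoin, ih, String.append_assoc]

theorem altRec_eq (header : String) (lines : List String) :
    altRec header lines =
      match lines.span (fun l => !(imradHeaders.contains (PySem.Str.rstrip l))) with
      | (body, []) => [(header, pyJoin body)]
      | (body, hd :: tl) => (header, pyJoin body) :: altRec (PySem.Str.rstrip hd) tl := by
  rw [altRec.eq_def]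
  split <;> rename_i h <;> rw [h]

theorem altRec_boundary (header l : String) (ls : List String)
    (hb : imradHeaders.contains (PySem.Str.rstrip l) = true) :
    altRec header (l :: ls) = (header, "") :: altRec (PySem.Str.rstrip l) ls := by
  have hb' : PySem.Str.rstrip l ∈ imradHeaders := by simpa using hb
  rw [altRec_eq]
  simp [List.span_eq_takeWhile_dropWhile, List.takeWhile_cons, List.dropWhile_cons, hb', pyJoin]

theorem altRec_not_boundary (header l : String) (ls : List String)
    (hb : imradHeaders.contains (PySem.Str.rstrip l) = false) :
    altRec header (l :: ls) = prependBody l (altRec header ls) := by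
  have hb' : PySem.Str.rstrip l ∉ imradHeaders := by simpa using hb
  rw [altRec_eq, altRec_eq]
  simp only [List.span_eq_takeWhile_dropWhile, List.takeWhile_cons, List.dropWhile_cons, hb',
    if_neg, decide_eq_true_eq]
  cases hdw : List.dropWhile (fun l => !(imradHeaders.contains (PySem.Str.rstrip l))) ls with
  | nil => simp [hb', prependBody, pyJoin]
  | cons hd tl => simp [hb', prependBody, pyJoin, String.append_assoc]

theorem loop_eq (lines : List String) (secs : List (String × String))
    (hdr : String) (cur : List String) :
    (let st := lines.foldl
      (fun (st : List (String × String) × String × List String) line =>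
        let stripped := PySem.Str.rstrip line
        if imradHeaders.contains stripped then
          (st.1 ++ [(st.2.1, pyJoin st.2.2)], stripped, [])
        else
          (st.1, st.2.1, st.2.2 ++ [line]))
      (secs, hdr, cur)
     st.1 ++ [(st.2.1, pyJoin st.2.2)])
    = secs ++ prependBody (pyJoin cur) (altRec hdr lines) := by
  induction lines generalizing secs hdr cur with
  | nil =>
    rw [altRec_eq]
    simp [List.span_eq_takeWhile_dropWhile, prependBody, pyJoin]
  | cons l ls ih =>
    by_cases hb : imradHeaders.contains (PySem.Str.rstrip l) = true
    · simp only [List.foldl_cons, hb, if_pos, reduceIte]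
      rw [ih, altRec_boundary _ _ _ hb]
      rw [show pyJoin [] = "" from rfl, prependBody_empty]
      simp [prependBody]
    · simp only [Bool.not_eq_true] at hb
      simp only [List.foldl_cons, hb, Bool.false_eq_true, reduceIte]
      rw [ih, altRec_not_boundary _ _ _ hb, prependBody_prependBody, join_append]
      simp [pyJoin]

-- ===== VERDICT (by name: the statement is the Claim_ definition above) =====
theorem split_sot_imrad_py_spec : Claim_equal_split_sot_imrad_py := by
  intro s _
  unfold Spec_split_sot_imrad_py split_sot_imrad_py split_sot_imrad_py_alt
  have := loop_eq (pyLines s) [] "" []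
  simp only [pyJoin] at this ⊢
  rw [this]
  simp [prependBody_empty]
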